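-- pv_equiv track=rewrite | github.com/dur1m4r/py | homework11/home2.py | more_than_three
-- ===== SOURCE A (Python) =====
-- def more_than_three(lst):
--     outputLst = []
--     counter = 0
--     for i in range(len(lst)):
--         if lst[i] > 3:
--             outputLst.append(counter)
--             counter += 1
--         else:
--             outputLst.append(counter)
--     return outputLst
-- ===== SOURCE B (Python) =====
-- def _bisect_left(a, t):
--     # index of the first element of sorted list a that is >= t
--     lo, hi = 0, len(a)
--     while lo < hi:
--         mid = (lo + hi) // 2
--         if a[mid] < t:
--             lo = mid + 1
--         else:
--             hi = mid
--     return lo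
--
-- def more_than_three(lst):
--     # Positions of the elements greater than 3, in increasing order;
--     # the answer at i is how many of those positions are < i, found by binary search.
--     idxs = [j for j, x in enumerate(lst) if x > 3]
--     return [_bisect_left(idxs, i) for i in range(len(lst))]
-- ===== Notes on version B (the rewrite author's own statement) =====
-- stated objective: alternative
-- what changed: Replaces A's single running-counter loop by a two-stage index structure: first collect the sorted list of positions holding elements > 3, then answer each query position i by a hand-rolled binary search (bisect_left) counting how many stored positions are < i.
import Mathlib
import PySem

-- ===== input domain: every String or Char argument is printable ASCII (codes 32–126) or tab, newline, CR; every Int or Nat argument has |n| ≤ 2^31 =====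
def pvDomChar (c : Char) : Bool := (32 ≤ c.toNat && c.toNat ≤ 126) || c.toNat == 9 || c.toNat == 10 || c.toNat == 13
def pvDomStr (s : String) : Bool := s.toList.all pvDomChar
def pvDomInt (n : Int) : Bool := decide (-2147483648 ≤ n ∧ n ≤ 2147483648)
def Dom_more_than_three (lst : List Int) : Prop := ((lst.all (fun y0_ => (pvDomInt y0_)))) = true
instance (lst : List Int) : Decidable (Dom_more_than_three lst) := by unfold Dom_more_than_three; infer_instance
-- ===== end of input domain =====

-- B answers each position by binary search into the sorted list of indices of elements > 3, instead of A's running-counter loop (alternative algorithm, same return values).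


-- ===== PORT A =====
-- for i in range(len(lst)): indices are always in range, so lst[i] is pyGetD with any default
def more_than_three (lst : List Int) : List Int :=
  ((PySem.List.pyRange 0 (lst.length : Int) 1).foldl
    (fun (st : List Int × Int) i =>
      if PySem.List.pyGetD lst i 0 > 3 then (st.1 ++ [st.2], st.2 + 1)
      else (st.1 ++ [st.2], st.2))
    ([], 0)).1

-- ===== PORT B =====
-- _bisect_left: while lo < hi: mid = (lo+hi)//2; a[mid] (index always in range) is pyGetD
def bisectLeft (a : List Int) (t : Int) (lo hi : Int) : Int :=
  if lo < hi then
    let mid := PySem.Int.floordiv (lo + hi) 2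
    if PySem.List.pyGetD a mid 0 < t then bisectLeft a t (mid + 1) hi
    else bisectLeft a t lo mid
  else lo
termination_by (hi - lo).toNat
decreasing_by
  · have h1 := (PySem.Int.floordiv_two_mid_bounds (show lo ≤ hi by omega)).1
    omega
  · have h2 : PySem.Int.floordiv (lo + hi) 2 < hi := by
      rw [PySem.Int.floordiv_lt_iff_lt_mul (by omega)]; omega
    omega

-- idxs = [j for j, x in enumerate(lst) if x > 3]; return [_bisect_left(idxs, i) for i in range(len(lst))]
def more_than_three_alt (lst : List Int) : List Int :=
  let idxs := ((PySem.List.enumerate lst).filter (fun p => decide (p.2 > 3))).map (fun p => p.1)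
  (PySem.List.pyRange 0 (lst.length : Int) 1).map (fun i => bisectLeft idxs i 0 (idxs.length : Int))

-- ===== PRECONDITION & SPEC =====
def Spec_more_than_three (lst : List Int) (out : List Int) : Prop := out = more_than_three_alt lst
instance (lst : List Int) (out : List Int) : Decidable (Spec_more_than_three lst out) := by unfold Spec_more_than_three; infer_instance

-- ===== CLAIM (what is proved, stated in full; the proofs are below) =====
def Claim_equal_more_than_three : Prop := ∀ (lst : List Int), Dom_more_than_three lst → Spec_more_than_three lst (more_than_three lst)

-- ===== LEMMAS AND PROOFS =====

-- number of elements of l greater than 3, as an Int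
def cnt (l : List Int) : Int := (l.countP (fun x => decide (3 < x)) : Int)

-- the index list B builds, with a general start offset (B's port uses offset 0)
def idxsFrom (s : Int) (l : List Int) : List Int :=
  ((PySem.List.enumerate l s).filter (fun p => decide (p.2 > 3))).map (fun p => p.1)

theorem idxsFrom_cons (s : Int) (x : Int) (l : List Int) :
    idxsFrom s (x :: l) = if 3 < x then s :: idxsFrom (s+1) l else idxsFrom (s+1) l := by
  by_cases h : 3 < x <;>
    simp [idxsFrom, PySem.List.enumerate_cons, h]

theorem idxsFrom_ge (l : List Int) : ∀ (s : Int), ∀ m ∈ idxsFrom s l, s ≤ m := by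
  induction l with
  | nil => simp [idxsFrom]
  | cons x xs ih =>
    intro s m hm
    rw [idxsFrom_cons] at hm
    split_ifs at hm with h
    · rcases List.mem_cons.mp hm with rfl | hm'
      · exact le_refl m
      · have := ih (s+1) m hm'; omega
    · have := ih (s+1) m hm; omega

-- counting stored indices below i equals the number of >3 elements in the prefix before i
theorem count_idxsFrom (l : List Int) (s i : Int) :
    ((idxsFrom s l).countP (fun j => decide (j < i)) : Int) = cnt (l.take (i - s).toNat) := by
  induction l generalizing s with
  | nil => simp [idxsFrom, cnt]
  | cons x xs ih =>
    rw [idxsFrom_cons]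
    rcases lt_or_ge s i with hsi | hsi
    · have htake : (i - s).toNat = ((i - (s+1)).toNat) + 1 := by omega
      rw [htake, List.take_succ_cons]
      have hx := ih (s+1)
      by_cases h : 3 < x
      · simp only [h, if_pos, List.countP_cons, decide_eq_true_eq, hsi, cnt] at *
        push_cast
        simp
        omega
      · simp only [h, if_false, cnt, List.countP_cons] at *
        simp [h]
        omega
    · have htake : (i - s).toNat = 0 := by omega
      have htake' : (i - (s+1)).toNat = 0 := by omega
      rw [htake, List.take_zero]
      have hx := ih (s+1)
      rw [htake', List.take_zero] at hx
      simp only [cnt, List.countP_nil, Nat.cast_zero] at hx ⊢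
      by_cases h : 3 < x
      · simp only [h, if_pos, List.countP_cons]
        have hsi' : ¬ (s < i) := by omega
        simp [hsi']
        intro a ha
        have := idxsFrom_ge xs (s+1) a ha
        omega
      · simp only [h, if_false]
        omega

theorem idxsFrom_pairwise (l : List Int) : ∀ (s : Int), (idxsFrom s l).Pairwise (· < ·) := by
  induction l with
  | nil => simp [idxsFrom]
  | cons x xs ih =>
    intro s
    rw [idxsFrom_cons]
    split_ifs with h
    · exact List.Pairwise.cons (fun m hm => by have := idxsFrom_ge xs (s+1) m hm; omega) (ih (s+1))
    · exact ih (s+1)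

-- index-monotonicity of a strictly increasing list, in pyGetD form
theorem mono_of_pairwise (a : List Int) (hp : a.Pairwise (· < ·)) :
    ∀ p q : Int, 0 ≤ p → p ≤ q → q < (a.length : Int) →
      PySem.List.pyGetD a p 0 ≤ PySem.List.pyGetD a q 0 := by
  intro p q hp0 hpq hqlen
  have hplen : p < (a.length : Int) := by omega
  rw [PySem.List.pyGetD_eq_getElem a 0 hp0 hplen,
      PySem.List.pyGetD_eq_getElem a 0 (by omega : (0:Int) ≤ q) hqlen]
  rcases eq_or_lt_of_le hpq with rfl | hlt
  · exact le_refl _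
  · have := (List.pairwise_iff_getElem.mp hp) p.toNat q.toNat (by omega) (by omega) (by omega)
    omega

-- binary-search specification: the result separates the < t prefix from the ≥ t suffix
theorem bs_spec (a : List Int) (t : Int)
    (mono : ∀ p q : Int, 0 ≤ p → p ≤ q → q < (a.length : Int) →
      PySem.List.pyGetD a p 0 ≤ PySem.List.pyGetD a q 0) :
    ∀ lo hi : Int, 0 ≤ lo → lo ≤ hi → hi ≤ (a.length : Int) →
    (∀ p : Int, 0 ≤ p → p < lo → PySem.List.pyGetD a p 0 < t) →
    (∀ q : Int, hi ≤ q → q < (a.length : Int) → ¬ PySem.List.pyGetD a q 0 < t) →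
    0 ≤ bisectLeft a t lo hi ∧ bisectLeft a t lo hi ≤ (a.length : Int) ∧
    (∀ p : Int, 0 ≤ p → p < bisectLeft a t lo hi → PySem.List.pyGetD a p 0 < t) ∧
    (∀ q : Int, bisectLeft a t lo hi ≤ q → q < (a.length : Int) → ¬ PySem.List.pyGetD a q 0 < t) := by
  intro lo hi
  induction lo, hi using bisectLeft.induct a t with
  | case1 lo hi h mid hmid ih =>
    have hmeq : mid = PySem.Int.floordiv (lo + hi) 2 := rfl
    intro hlo hle hhi hleft hright
    have hb := PySem.Int.floordiv_two_mid_bounds (show lo ≤ hi by omega)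
    have hmlt : PySem.Int.floordiv (lo + hi) 2 < hi := by
      rw [PySem.Int.floordiv_lt_iff_lt_mul (by omega)]; omega
    rw [bisectLeft, if_pos h]
    simp only [← hmeq, if_pos hmid]
    refine ih (by omega) (by omega) hhi ?_ hright
    intro p hp0 hpm
    calc PySem.List.pyGetD a p 0 ≤ PySem.List.pyGetD a mid 0 :=
          mono p _ hp0 (by omega) (by omega)
      _ < t := hmid
  | case2 lo hi h mid hmid ih =>
    have hmeq : mid = PySem.Int.floordiv (lo + hi) 2 := rfl
    intro hlo hle hhi hleft hright
    have hb := PySem.Int.floordiv_two_mid_bounds (show lo ≤ hi by omega)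
    have hmlt : PySem.Int.floordiv (lo + hi) 2 < hi := by
      rw [PySem.Int.floordiv_lt_iff_lt_mul (by omega)]; omega
    rw [bisectLeft, if_pos h]
    simp only [← hmeq, if_neg hmid]
    refine ih hlo (by omega) (by omega) hleft ?_
    intro q hmq hqlen hqt
    exact hmid (lt_of_le_of_lt (mono _ q (by omega) hmq hqlen) hqt)
  | case3 lo hi h =>
    intro hlo hle hhi hleft hright
    rw [bisectLeft, if_neg h]
    have : lo = hi := by omega
    subst this
    exact ⟨hlo, hhi, hleft, hright⟩

-- a threshold position determines the count of elements below t
theorem count_of_threshold (a : List Int) (t r : Int) (h0 : 0 ≤ r) (hr : r ≤ (a.length : Int))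
    (hl : ∀ p : Int, 0 ≤ p → p < r → PySem.List.pyGetD a p 0 < t)
    (hrt : ∀ q : Int, r ≤ q → q < (a.length : Int) → ¬ PySem.List.pyGetD a q 0 < t) :
    (a.countP (fun x => decide (x < t)) : Int) = r := by
  have hsplit : a.countP (fun x => decide (x < t))
      = (a.take r.toNat).countP (fun x => decide (x < t))
        + (a.drop r.toNat).countP (fun x => decide (x < t)) := by
    rw [← List.countP_append, List.take_append_drop]
  have h1 : (a.take r.toNat).countP (fun x => decide (x < t)) = (a.take r.toNat).length := by
    apply List.countP_eq_length.mpr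
    intro x hx
    obtain ⟨i, hi, hxi⟩ := List.mem_iff_getElem.mp hx
    have hil : i < r.toNat := by
      have := hi; rw [List.length_take] at this; omega
    have hia : i < a.length := by
      have := hi; rw [List.length_take] at this; omega
    have hlt := hl (i : Int) (by omega) (by omega)
    rw [PySem.List.pyGetD_eq_getElem a 0 (by omega) (by exact_mod_cast hia)] at hlt
    simp only [Int.toNat_natCast] at hlt
    rw [← hxi, List.getElem_take]
    simp [hlt]
  have h2 : (a.drop r.toNat).countP (fun x => decide (x < t)) = 0 := by
    apply List.countP_eq_zero.mpr
    intro x hx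
    obtain ⟨i, hi, hxi⟩ := List.mem_iff_getElem.mp hx
    have hia : r.toNat + i < a.length := by
      have := hi; rw [List.length_drop] at this; omega
    have hge := hrt ((r.toNat + i : Nat) : Int) (by omega) (by exact_mod_cast hia)
    rw [PySem.List.pyGetD_eq_getElem a 0 (by omega) (by exact_mod_cast hia)] at hge
    simp only [Int.toNat_natCast] at hge
    rw [← hxi, List.getElem_drop]
    simpa using hge
  rw [hsplit, h1, h2, List.length_take]
  have : r.toNat ≤ a.length := by omega
  omega

-- A-side: the fold, started from (out, c), appends c + exclusive prefix counts
theorem mtt_fold (l : List Int) (out : List Int) (c : Int) :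
    (l.foldl
      (fun (st : List Int × Int) x =>
        if x > 3 then (st.1 ++ [st.2], st.2 + 1) else (st.1 ++ [st.2], st.2))
      (out, c)).1
    = out ++ (List.range l.length).map (fun k => c + cnt (l.take k)) := by
  induction l generalizing out c with
  | nil => simp
  | cons x xs ih =>
    simp only [List.foldl_cons, List.length_cons, List.range_succ_eq_map, List.map_cons,
      List.map_map]
    by_cases h : x > 3
    · simp only [h, if_pos]
      rw [ih, List.append_assoc, List.singleton_append]
      congr 2
      · simp [cnt]
      · apply List.map_congr_left
        intro a ha
        simp only [Function.comp_apply, cnt, List.take_succ_cons, List.countP_cons, h, decide_true]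
        push_cast
        ring
    · simp only [h, if_false]
      rw [ih, List.append_assoc, List.singleton_append]
      congr 2
      · simp [cnt]
      · apply List.map_congr_left
        intro a ha
        simp only [Function.comp_apply, cnt, List.take_succ_cons, List.countP_cons, h, decide_false]
        push_cast
        ring

-- B's answer at query i is the exclusive prefix count
theorem bs_count (lst : List Int) (i : Int) :
    bisectLeft (idxsFrom 0 lst) i 0 ((idxsFrom 0 lst).length : Int) = cnt (lst.take i.toNat) := by
  set a := idxsFrom 0 lst with ha
  have mono := mono_of_pairwise a (idxsFrom_pairwise lst 0)
  obtain ⟨h0, hr, hl, hrt⟩ :=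
    bs_spec a i mono 0 (a.length : Int) (le_refl 0) (Int.natCast_nonneg _) (le_refl _)
      (fun p hp0 hpl => absurd hpl (by omega)) (fun q hq hql => absurd hql (by omega))
  have hcount := count_of_threshold a i _ h0 hr hl hrt
  have hidx := count_idxsFrom lst 0 i
  rw [← hcount, ha]
  have he : (i - (0:Int)) = i := by omega
  rw [he] at hidx
  exact hidx

-- ===== VERDICT (by name: the statement is the Claim_ definition above) =====
theorem more_than_three_spec : Claim_equal_more_than_three := by
  intro lst _
  unfold Spec_more_than_three more_than_three more_than_three_alt
  rw [PySem.List.foldl_pyRange_zero_pyGetD' lst 0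
    (fun (st : List Int × Int) x =>
      if x > 3 then (st.1 ++ [st.2], st.2 + 1) else (st.1 ++ [st.2], st.2)) ([], 0)]
  rw [mtt_fold]
  simp only [List.nil_append]
  rw [PySem.List.pyRange_one 0 (lst.length : Int)]
  simp only [List.map_map]
  apply List.map_congr_left
  intro k hk
  simp only [Function.comp_apply, zero_add]
  have hid : ((PySem.List.enumerate lst).filter (fun p => decide (p.2 > 3))).map (fun p => p.1)
      = idxsFrom 0 lst := rfl
  rw [hid, bs_count lst (k : Int)]
  simp
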